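-- pv_equiv track=rewrite | github.com/aakhoja/Practice-Problems | continousSubArraysSawtooth.py | solution
-- ===== SOURCE A (Python) =====
-- def solution(arr):
--     # holds the count of sawtooths at each index of our input array,
--     # for sawtooth lengths up to that index
--     saws = [0 for x in range(0, len(arr))]
--     # the resulting total sawtooth counts
--     totalSawCounts = 0
--     previousCount = 0
--
--     for currIdx in range(1, len(arr)):
--         currCount = 0
--         before = currIdx -1
--         if (arr[currIdx] > arr[before]):
--             goingUp = True
--         elif (arr[currIdx] < arr[before]):
--             goingUp = False
--         else:
--             break
--
--         # if we made it here, we have at least one sawtooth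
--         currCount =  1
--
--         # see if there was a previous solution (the DP part)
--         # and if it continues our current sawtooth
--         if before >= 1:
--             if goingUp:
--                 if arr[before-1] > arr[before]:
--                     currCount = previousCount + currCount
--             else:
--                 if arr[before-1] < arr[before]:
--                     currCount = previousCount + currCount
--         previousCount = currCount
--         totalSawCounts = totalSawCounts + currCount
--
--     return totalSawCounts
-- ===== SOURCE B (Python) =====
-- def solution(arr):
--     # sign sequence of consecutive differences, truncated at first equal pair
--     signs = []
--     for i in range(1, len(arr)):
--         d = arr[i] - arr[i - 1]
--         if d == 0:
--             break
--         signs.append(1 if d > 0 else -1)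
--     # sum m*(m+1)//2 over maximal alternating runs of the sign sequence
--     total = 0
--     m = 0
--     prev = 0
--     for s in signs:
--         if prev != 0 and s == prev:
--             total += m * (m + 1) // 2
--             m = 1
--         else:
--             m += 1
--         prev = s
--     return total + m * (m + 1) // 2
-- ===== Notes on version B (the rewrite author's own statement) =====
-- stated objective: alternative
-- what changed: Replaces the per-index DP (carrying previousCount and re-inspecting arr[before-1]) with a two-phase decomposition: first build the truncated +1/-1 difference-sign sequence, then sum m*(m+1)//2 over its maximal alternating runs.
import Mathlib
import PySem

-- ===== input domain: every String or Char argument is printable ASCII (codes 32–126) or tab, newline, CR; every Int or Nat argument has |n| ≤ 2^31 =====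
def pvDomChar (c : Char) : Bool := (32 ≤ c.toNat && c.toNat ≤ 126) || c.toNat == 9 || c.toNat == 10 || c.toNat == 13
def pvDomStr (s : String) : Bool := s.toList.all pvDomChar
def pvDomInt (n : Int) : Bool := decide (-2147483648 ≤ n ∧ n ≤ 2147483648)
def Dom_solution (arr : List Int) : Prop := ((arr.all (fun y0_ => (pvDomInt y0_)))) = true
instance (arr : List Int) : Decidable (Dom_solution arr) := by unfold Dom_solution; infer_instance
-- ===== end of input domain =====

-- B counts sawtooth subarrays by runs of alternating difference signs instead of A's per-index DP.

-- ===== PORT A =====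
-- arr[i] for the in-range indices the loop uses (getD 0 is never hit on the loop's indices)
def pyGetI (arr : List Int) (i : Nat) : Int := (PySem.List.pyGet? arr (i : Int)).getD 0

-- the 'for currIdx in range(1, len(arr))' loop with its break; fuel = number of remaining indices
def solLoopA (arr : List Int) : Nat → Nat → Int → Int → Int
  | 0, _, total, _ => total
  | fuel + 1, i, total, prevCount =>
    if pyGetI arr i > pyGetI arr (i - 1) then
      let curr : Int :=
        if 1 ≤ i - 1 then
          if pyGetI arr (i - 2) > pyGetI arr (i - 1) then prevCount + 1 else 1
        else 1
      solLoopA arr fuel (i + 1) (total + curr) curr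
    else if pyGetI arr i < pyGetI arr (i - 1) then
      let curr : Int :=
        if 1 ≤ i - 1 then
          if pyGetI arr (i - 2) < pyGetI arr (i - 1) then prevCount + 1 else 1
        else 1
      solLoopA arr fuel (i + 1) (total + curr) curr
    else total  -- break

def solution (arr : List Int) : Int :=
  solLoopA arr (arr.length - 1) 1 0 0

-- ===== PORT B =====
-- phase 1: difference signs, truncated at the first zero difference (the break)
def signsLoop (arr : List Int) : Nat → Nat → List Int → List Int
  | 0, _, acc => acc
  | fuel + 1, i, acc =>
    let d := pyGetI arr i - pyGetI arr (i - 1)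
    if d = 0 then acc
    else signsLoop arr fuel (i + 1) (acc ++ [if d > 0 then 1 else -1])

-- phase 2: for each maximal alternating run of length m add m*(m+1)//2
def runLoop : List Int → Int → Int → Int → Int
  | [], total, m, _ => total + PySem.Int.floordiv (m * (m + 1)) 2
  | s :: rest, total, m, prev =>
    if prev ≠ 0 ∧ s = prev then runLoop rest (total + PySem.Int.floordiv (m * (m + 1)) 2) 1 s
    else runLoop rest total (m + 1) s

def solution_alt (arr : List Int) : Int :=
  runLoop (signsLoop arr (arr.length - 1) 1 []) 0 0 0

-- ===== PRECONDITION & SPEC =====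
def Spec_solution (arr : List Int) (out : Int) : Prop := out = solution_alt arr
instance (arr : List Int) (out : Int) : Decidable (Spec_solution arr out) := by unfold Spec_solution; infer_instance

-- ===== CLAIM (what is proved, stated in full; the proofs are below) =====
def Claim_equal_solution : Prop := ∀ (arr : List Int), Dom_solution arr → Spec_solution arr (solution arr)

-- ===== LEMMAS AND PROOFS =====

def tri (m : Int) : Int := PySem.Int.floordiv (m * (m + 1)) 2

theorem tri_zero : tri 0 = 0 := by decide

theorem tri_succ (m : Int) : tri m + (m + 1) = tri (m + 1) := by
  unfold tri
  rw [PySem.Int.floordiv_eq_ediv_of_pos (by norm_num : (0:Int) < 2),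
    PySem.Int.floordiv_eq_ediv_of_pos (by norm_num : (0:Int) < 2)]
  have h1 : m * (m + 1) = 2 * (m * (m + 1) / 2) := (Int.two_mul_ediv_two_of_even (Int.even_mul_succ_self m)).symm
  have h2 : (m + 1) * (m + 1 + 1) = 2 * ((m + 1) * (m + 1 + 1) / 2) :=
    (Int.two_mul_ediv_two_of_even (Int.even_mul_succ_self (m + 1))).symm
  have hab : (m + 1) * (m + 1 + 1) = m * (m + 1) + 2 * (m + 1) := by ring
  omega

theorem signsLoop_acc (arr : List Int) (fuel : Nat) :
    ∀ (i : Nat) (acc : List Int), signsLoop arr fuel i acc = acc ++ signsLoop arr fuel i [] := by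
  induction fuel with
  | zero => intro i acc; simp [signsLoop]
  | succ f ih =>
    intro i acc
    simp only [signsLoop]
    split
    · simp
    · rw [ih (i+1), ih (i+1) ([] ++ _)]
      simp

theorem main_inv (arr : List Int) (fuel : Nat) :
    ∀ (i : Nat) (tB m prev : Int), 1 ≤ i → 0 ≤ m →
    ((i = 1 ∧ m = 0 ∧ prev = 0) ∨
      (2 ≤ i ∧ 1 ≤ m ∧ pyGetI arr (i-1) ≠ pyGetI arr (i-2) ∧
        prev = (if pyGetI arr (i-1) - pyGetI arr (i-2) > 0 then (1:Int) else -1))) →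
    solLoopA arr fuel i (tB + tri m) m = runLoop (signsLoop arr fuel i []) tB m prev := by
  induction fuel with
  | zero =>
    intro i tB m prev _ _ _
    simp [solLoopA, signsLoop, runLoop, tri]
  | succ f ih =>
    intro i tB m prev hi hm hinv
    have e1 : i + 1 - 1 = i := by omega
    have e2 : i + 1 - 2 = i - 1 := by omega
    rcases lt_trichotomy (pyGetI arr i) (pyGetI arr (i-1)) with hlt | heq | hgt
    · -- strictly down: sign -1
      have h2 : signsLoop arr (f+1) i [] = -1 :: signsLoop arr f (i+1) [] := by
        simp only [signsLoop]
        rw [if_neg (by omega : ¬ (pyGetI arr i - pyGetI arr (i-1) = 0)),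
          if_neg (by omega : ¬ (pyGetI arr i - pyGetI arr (i-1) > 0)), signsLoop_acc]
        simp
      rw [h2]
      simp only [solLoopA, if_neg (by omega : ¬ (pyGetI arr i > pyGetI arr (i-1))),
        if_pos hlt, runLoop]
      rcases hinv with ⟨hi1, hm0, hp0⟩ | ⟨hi2, hm1, hne, hp⟩
      · subst hi1; subst hm0; subst hp0
        simp only [show (1:Nat) - 1 = 0 from rfl] at hlt
        rw [if_neg (by omega : ¬ ((1:Nat) ≤ 1 - 1)), if_neg (by simp)]
        have := ih 2 tB 1 (-1) (by omega) (by omega)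
          (Or.inr ⟨by omega, by omega, by simpa using ne_of_lt hlt, by
            simp only [show (2:Nat) - 1 = 1 from rfl, show (2:Nat) - 2 = 0 from rfl]
            rw [if_neg (by omega)]⟩)
        simpa [tri] using this
      · rw [if_pos (by omega : (1:Nat) ≤ i - 1)]
        by_cases hpd : pyGetI arr (i-1) - pyGetI arr (i-2) > 0
        · -- previous diff up, alternation continues: curr = m + 1
          rw [if_pos (by omega : pyGetI arr (i-2) < pyGetI arr (i-1)),
            if_neg (by rw [hp, if_pos hpd]; simp)]
          have := ih (i+1) tB (m+1) (-1) (by omega) (by omega)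
            (Or.inr ⟨by omega, by omega, by rw [e1, e2]; omega, by
              rw [e1, e2, if_neg (by omega)]⟩)
          rw [← tri_succ m, ← add_assoc] at this
          exact this
        · -- previous diff down too: run breaks, curr = 1
          rw [if_neg (by omega : ¬ (pyGetI arr (i-2) < pyGetI arr (i-1))),
            if_pos (by rw [hp, if_neg hpd]; exact ⟨by simp, rfl⟩)]
          have := ih (i+1) (tB + tri m) 1 (-1) (by omega) (by omega)
            (Or.inr ⟨by omega, by omega, by rw [e1, e2]; omega, by
              rw [e1, e2, if_neg (by omega)]⟩)
          simpa [tri, add_assoc] using this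
    · -- equal: break
      simp [solLoopA, signsLoop, runLoop, heq, tri]
    · -- strictly up: sign 1
      have h2 : signsLoop arr (f+1) i [] = 1 :: signsLoop arr f (i+1) [] := by
        simp only [signsLoop]
        rw [if_neg (by omega : ¬ (pyGetI arr i - pyGetI arr (i-1) = 0)),
          if_pos (by omega : pyGetI arr i - pyGetI arr (i-1) > 0), signsLoop_acc]
        simp
      rw [h2]
      simp only [solLoopA, if_pos hgt, runLoop]
      rcases hinv with ⟨hi1, hm0, hp0⟩ | ⟨hi2, hm1, hne, hp⟩
      · subst hi1; subst hm0; subst hp0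
        simp only [show (1:Nat) - 1 = 0 from rfl] at hgt
        rw [if_neg (by omega : ¬ ((1:Nat) ≤ 1 - 1)), if_neg (by simp)]
        have := ih 2 tB 1 1 (by omega) (by omega)
          (Or.inr ⟨by omega, by omega, by simpa using ne_of_gt hgt, by
            simp only [show (2:Nat) - 1 = 1 from rfl, show (2:Nat) - 2 = 0 from rfl]
            rw [if_pos (by omega)]⟩)
        simpa [tri] using this
      · rw [if_pos (by omega : (1:Nat) ≤ i - 1)]
        by_cases hpd : pyGetI arr (i-1) - pyGetI arr (i-2) > 0
        · -- previous diff up too: run breaks, curr = 1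
          rw [if_neg (by omega : ¬ (pyGetI arr (i-2) > pyGetI arr (i-1))),
            if_pos (by rw [hp, if_pos hpd]; exact ⟨by simp, rfl⟩)]
          have := ih (i+1) (tB + tri m) 1 1 (by omega) (by omega)
            (Or.inr ⟨by omega, by omega, by rw [e1, e2]; omega, by
              rw [e1, e2, if_pos (by omega)]⟩)
          simpa [tri, add_assoc] using this
        · -- previous diff down, alternation continues: curr = m + 1
          rw [if_pos (by omega : pyGetI arr (i-2) > pyGetI arr (i-1)),
            if_neg (by rw [hp, if_neg hpd]; simp)]
          have := ih (i+1) tB (m+1) 1 (by omega) (by omega)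
            (Or.inr ⟨by omega, by omega, by rw [e1, e2]; omega, by
              rw [e1, e2, if_pos (by omega)]⟩)
          rw [← tri_succ m, ← add_assoc] at this
          exact this

-- ===== VERDICT (by name: the statement is the Claim_ definition above) =====
theorem solution_spec : Claim_equal_solution := by
  intro arr _
  unfold Spec_solution solution solution_alt
  have h := main_inv arr (arr.length - 1) 1 0 0 0 (by omega) (by omega) (Or.inl ⟨rfl, rfl, rfl⟩)
  simpa [tri_zero] using h
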